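-- pv_equiv track=rewrite | github.com/dq116/A-simple-Lexer | lexer.py | filter_source
-- ===== SOURCE A (Python) =====
-- def filter_source(s):#过滤注释
--     result=''
--     flag=False
--     for i in s:
--         if i==note_tail:
--             flag=False
--             continue
--         if flag:
--             continue
--         if i == note_head:
--             flag=True
--             continue
--         result+=i
--     if flag:
--         return False,error_note
--
--     return True,result
--
-- note_head='{'
--
-- note_tail='}'
-- ===== SOURCE B (Python) =====
-- note_head = '{'
--
-- note_tail = '}'
--
--
-- def filter_source(s):
--     # Split on the comment closer: every '}' is a piece boundary (and is thereby
--     # dropped, matching A's stray-'}' behaviour); within each piece, everything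
--     # from the first '{' onwards is commented out up to the piece boundary.
--     pieces = s.split(note_tail)
--     if note_head in pieces[-1]:
--         # comment opened after the last '}' is never closed
--         return False, ''
--     return True, ''.join(p.split(note_head, 1)[0] for p in pieces)
-- ===== Notes on version B (the rewrite author's own statement) =====
-- stated objective: simpler
-- what changed: Replaced A's stateful char-by-char flag scanner with a split/join formulation: split the string on '}' and keep each piece's text before its first '{'; unclosed comment iff the last piece contains '{' (there A raises NameError, excluded by Pre_).
import Mathlib
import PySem

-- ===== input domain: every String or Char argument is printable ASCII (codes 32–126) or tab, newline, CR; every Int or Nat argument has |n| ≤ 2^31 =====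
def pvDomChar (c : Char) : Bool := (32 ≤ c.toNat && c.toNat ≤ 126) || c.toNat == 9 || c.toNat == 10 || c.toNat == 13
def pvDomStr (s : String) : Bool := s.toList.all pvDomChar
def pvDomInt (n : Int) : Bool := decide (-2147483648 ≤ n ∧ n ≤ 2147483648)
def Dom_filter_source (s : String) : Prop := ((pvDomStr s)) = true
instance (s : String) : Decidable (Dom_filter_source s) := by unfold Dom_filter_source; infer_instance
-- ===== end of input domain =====

-- B replaces A's char-by-char flag scanner by split/join: split the string on '}' and keep
-- each piece's text before its first '{' (objective: simpler; a timing run also measured it faster — C-level split/join vs a per-char Python loop).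

-- ===== PORT A =====
-- the loop body of A's 'for i in s' (state: result as List Char — Lean's String append
-- is kernel-opaque — and the flag)
def stepA (st : List Char × Bool) (i : Char) : List Char × Bool :=
  if i = '}' then (st.1, false)
  else if st.2 then st
  else if i = '{' then (st.1, true)
  else (st.1 ++ [i], st.2)

def filter_source (s : String) : Bool × String :=
  let st := s.toList.foldl stepA ([], false)
  if st.2 then (false, "error_note")  -- Python A raises NameError here ('error_note' is undefined
                                      -- in the module); excluded by Pre_, placeholder value
  else (true, String.ofList st.1)

-- ===== PORT B =====
def filter_source_alt (s : String) : Bool × String :=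
  let ps := PySem.Chars.splitOn s.toList ['}']                -- pieces = s.split(note_tail)
  if PySem.Chars.isIn ['{'] ((PySem.List.pyGet? ps (-1)).getD []) then  -- note_head in pieces[-1] (split is never empty)
    (false, "")
  else
    (true, String.ofList (PySem.Chars.join []                 -- ''.join(...)
      (ps.map (fun p => (PySem.Chars.splitOnMax p ['{'] 1).headD []))))  -- p.split(note_head, 1)[0] (always nonempty)

-- ===== PRECONDITION & SPEC =====
-- Pre_ excludes exactly the strings with an unclosed comment (a '{' after the last '}'),
-- on which Python A raises NameError ('error_note' is undefined in the module).
def Pre_filter_source (s : String) : Prop :=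
  '{' ∉ s.toList.reverse.takeWhile (fun c => c ≠ '}')
instance (s : String) : Decidable (Pre_filter_source s) := by
  unfold Pre_filter_source; infer_instance

def pvWitness_filter_source : String := "a{b}c"

def Spec_filter_source (s : String) (out : Bool × String) : Prop := out = filter_source_alt s
instance (s : String) (out : Bool × String) : Decidable (Spec_filter_source s out) := by unfold Spec_filter_source; infer_instance

-- ===== CLAIM (what is proved, stated in full; the proofs are below) =====
def Claim_equal_filter_source : Prop := ∀ (s : String), Dom_filter_source s → Pre_filter_source s → Spec_filter_source s (filter_source s)

-- ===== LEMMAS AND PROOFS =====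

def pieces : List Char → List (List Char)
  | [] => [[]]
  | c :: t => if c = '}' then [] :: pieces t else (pieces t).modifyHead (fun h => c :: h)

def takeW (p : List Char) : List Char := p.takeWhile (fun c => c ≠ '{')

def outF (l : List Char) : List Char := ((pieces l).map takeW).flatten

def outT (l : List Char) : List Char := (((pieces l).tail).map takeW).flatten

def flagF (l : List Char) : Bool := decide ('{' ∈ (pieces l).getLastD [])

def flagT (l : List Char) : Bool := if (pieces l).tail = [] then true else flagF l

theorem pieces_ne_nil (l : List Char) : pieces l ≠ [] := by
  induction l with
  | nil => simp [pieces]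
  | cons c t ih =>
    simp only [pieces]
    split
    · simp
    · cases h : pieces t with
      | nil => exact absurd h ih
      | cons a r => simp

theorem foldA_spec (l : List Char) : ∀ res : List Char,
    l.foldl stepA (res, false) = (res ++ outF l, flagF l)
  ∧ l.foldl stepA (res, true) = (res ++ outT l, flagT l) := by
  induction l with
  | nil => intro res; constructor <;> simp [outF, outT, flagF, flagT, pieces, takeW]
  | cons c t ih =>
    intro res
    obtain ⟨hd, r, hp⟩ := List.exists_cons_of_ne_nil (pieces_ne_nil t)
    by_cases hc : c = '}'
    · subst hc
      constructor
      · rw [List.foldl_cons, show stepA (res, false) '}' = (res, false) from by simp [stepA],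
           (ih res).1]
        simp only [Prod.mk.injEq]
        refine ⟨?_, ?_⟩
        · simp [outF, pieces, takeW]
        · simp [flagF, pieces, hp, List.getLastD_cons]
      · rw [List.foldl_cons, show stepA (res, true) '}' = (res, false) from by simp [stepA],
           (ih res).1]
        simp only [Prod.mk.injEq]
        refine ⟨?_, ?_⟩
        · simp [outF, outT, pieces]
        · simp [flagT, flagF, pieces, hp, List.getLastD_cons]
    · by_cases hb : c = '{'
      · subst hb
        constructor
        · rw [List.foldl_cons, show stepA (res, false) '{' = (res, true) from by simp [stepA],
             (ih res).2]
          simp only [Prod.mk.injEq]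
          refine ⟨?_, ?_⟩
          · simp [outF, outT, pieces, hp, takeW]
          · cases r with
            | nil => simp [flagF, flagT, pieces, hp, List.getLastD_cons]
            | cons h2 r2 => simp [flagF, flagT, pieces, hp, List.getLastD_cons]
        · rw [List.foldl_cons, show stepA (res, true) '{' = (res, true) from by simp [stepA],
             (ih res).2]
          simp only [Prod.mk.injEq]
          refine ⟨?_, ?_⟩
          · simp [outT, pieces, hp]
          · cases r with
            | nil => simp [flagT, pieces, hp]
            | cons h2 r2 => simp [flagT, flagF, pieces, hp, List.getLastD_cons]
      · constructor
        · rw [List.foldl_cons, show stepA (res, false) c = (res ++ [c], false) from by simp [stepA, hc, hb],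
             ((ih (res ++ [c])).1)]
          simp only [Prod.mk.injEq]
          refine ⟨?_, ?_⟩
          · simp [outF, pieces, hp, takeW, List.takeWhile_cons, hc, hb]
          · cases r with
            | nil => simp [flagF, pieces, hp, List.getLastD_cons, hc, hb, Ne.symm hb]
            | cons h2 r2 => simp [flagF, pieces, hp, List.getLastD_cons, hc]
        · rw [List.foldl_cons, show stepA (res, true) c = (res, true) from by simp [stepA, hc],
             (ih res).2]
          simp only [Prod.mk.injEq]
          refine ⟨?_, ?_⟩
          · simp [outT, pieces, hp, hc]
          · cases r with
            | nil => simp [flagT, pieces, hp, hc]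
            | cons h2 r2 => simp [flagT, flagF, pieces, hp, List.getLastD_cons, hc]

theorem splitOn_go_eq : ∀ (fuel : Nat) (l cur : List Char) (acc : List (List Char)),
    l.length < fuel →
    PySem.Chars.splitOn.go ['}'] fuel l cur acc
      = acc.reverse ++ (pieces l).modifyHead (fun h => cur.reverse ++ h) := by
  intro fuel
  induction fuel with
  | zero => intro l cur acc h; omega
  | succ f ih =>
    intro l cur acc h
    cases l with
    | nil =>
      rw [PySem.Chars.splitOn.go.eq_def]
      simp [pieces]
    | cons c rest =>
      rw [PySem.Chars.splitOn.go.eq_def]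
      simp only [List.isPrefixOf, List.length_cons] at *
      by_cases hc : c = '}'
      · subst hc
        simp only [pieces, if_pos rfl]
        rw [if_pos (by simp)]
        simp only [List.length_nil, Nat.zero_add, List.drop_one, List.tail_cons]
        rw [ih rest [] (List.reverse cur :: acc) (by omega)]
        have h1 : List.modifyHead (fun h : List Char => [].reverse ++ h) (pieces rest) = pieces rest := by
          have : (fun h : List Char => [].reverse ++ h) = id := by funext h; simp
          rw [this, List.modifyHead_id]; rfl
        rw [h1]
        simp
      · rw [if_neg (by simp [List.isPrefixOf]; intro h'; exact hc h'.symm)]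
        rw [ih rest (c :: cur) acc (by omega)]
        simp only [pieces, if_neg hc, List.modifyHead_modifyHead]
        have : (fun h : List Char => (c :: cur).reverse ++ h)
             = ((fun h => cur.reverse ++ h) ∘ fun h : List Char => c :: h) := by
          funext h; simp
        rw [this]

theorem splitOn_eq_pieces (l : List Char) : PySem.Chars.splitOn l ['}'] = pieces l := by
  rw [PySem.Chars.splitOn, splitOn_go_eq (l.length + 1) l [] [] (by omega)]
  have h1 : (fun h : List Char => [].reverse ++ h) = id := by funext h; simp
  rw [h1, List.modifyHead_id]
  simp

theorem splitOnMax_go_zero (fuel : Nat) (l cur : List Char) (acc : List (List Char)) :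
    PySem.Chars.splitOnMax.go ['{'] fuel 0 l cur acc = acc.reverse ++ [cur.reverse ++ l] := by
  rw [PySem.Chars.splitOnMax.go.eq_def]
  cases fuel with
  | zero => simp
  | succ f => cases l with
    | nil => simp
    | cons c rest => simp

theorem splitOnMax_go_one : ∀ (fuel : Nat) (l cur : List Char) (acc : List (List Char)),
    l.length < fuel →
    PySem.Chars.splitOnMax.go ['{'] fuel 1 l cur acc
      = acc.reverse ++ (cur.reverse ++ l.takeWhile (fun c => c ≠ '{')) ::
          (if '{' ∈ l then [(l.dropWhile (fun c => c ≠ '{')).tail] else []) := by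
  intro fuel
  induction fuel with
  | zero => intro l cur acc h; omega
  | succ f ih =>
    intro l cur acc h
    cases l with
    | nil => rw [PySem.Chars.splitOnMax.go.eq_def]; simp
    | cons c rest =>
      simp only [List.length_cons] at h
      rw [PySem.Chars.splitOnMax.go.eq_def]
      simp only [List.isPrefixOf, Bool.and_true, List.length_cons, Nat.one_ne_zero, if_false]
      by_cases hc : c = '{'
      · subst hc
        rw [if_pos (by simp)]
        simp only [List.length_cons, List.length_nil, Nat.zero_add, List.drop_one, List.tail_cons]
        rw [splitOnMax_go_zero]
        simp [List.takeWhile_cons, List.dropWhile_cons]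
      · rw [if_neg (by simp; intro h'; exact hc h'.symm)]
        rw [ih rest (c :: cur) acc (by omega)]
        have hcc : ¬ ('{' = c) := fun h' => hc h'.symm
        simp [List.takeWhile_cons, List.dropWhile_cons, hc, hcc]

theorem splitOnMax_head (p : List Char) :
    (PySem.Chars.splitOnMax p ['{'] 1).headD [] = p.takeWhile (fun c => c ≠ '{') := by
  rw [PySem.Chars.splitOnMax]
  rw [if_neg (by omega)]
  rw [show ((1:Int).toNat) = 1 from rfl]
  rw [splitOnMax_go_one (p.length + 1) p [] [] (by omega)]
  simp

theorem join_nil_flatten (parts : List (List Char)) :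
    PySem.Chars.join [] parts = parts.flatten := by
  induction parts with
  | nil => simp [PySem.Chars.join_nil]
  | cons a rest ih =>
    cases rest with
    | nil => simp [PySem.Chars.join_singleton]
    | cons b r =>
      rw [PySem.Chars.join_cons_cons] at *
      simp_all

theorem isIn_singleton (p : List Char) :
    PySem.Chars.isIn ['{'] p = decide ('{' ∈ p) := by
  by_cases h : '{' ∈ p
  · simp [h]
    rw [PySem.Chars.isIn_iff_infix]
    obtain ⟨a, b, rfl⟩ := List.append_of_mem h
    exact ⟨a, b, by simp⟩
  · simp [h]
    rw [PySem.Chars.isIn_eq_false_iff]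
    intro hinf
    exact h (hinf.subset (by simp))

theorem pyGet_neg_one (L : List (List Char)) (h : L ≠ []) :
    (PySem.List.pyGet? L (-1)).getD [] = L.getLastD [] := by
  have hlen : 0 < L.length := List.length_pos_of_ne_nil h
  simp only [PySem.List.pyGet?, PySem.List.pyIdx?]
  rw [if_neg (by omega), if_pos (by omega)]
  rw [show ((-(-1:Int)).toNat) = 1 from rfl]
  simp only [Option.bind]
  rw [← List.getLast?_eq_getElem?, List.getLastD_eq_getLast?]

theorem pieces_no_sep (t : List Char) (h : '}' ∉ t) : pieces t = [t] := by
  induction t with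
  | nil => simp [pieces]
  | cons c t ih =>
    simp only [List.mem_cons, not_or] at h
    have hc : ¬ c = '}' := fun e => h.1 e.symm
    simp [pieces, hc, ih h.2]

theorem pieces_tail_ne (t : List Char) (h : '}' ∈ t) : (pieces t).tail ≠ [] := by
  induction t with
  | nil => simp at h
  | cons c t ih =>
    by_cases hc : c = '}'
    · simp [pieces, hc, pieces_ne_nil t]
    · have hm : '}' ∈ t := by
        rcases List.mem_cons.mp h with h' | h'
        · exact absurd h'.symm hc
        · exact h'
      obtain ⟨hd, r, hp⟩ := List.exists_cons_of_ne_nil (pieces_ne_nil t)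
      have := ih hm
      simp [pieces, hc, hp] at this ⊢
      exact this

theorem getLastD_pieces (l : List Char) :
    (pieces l).getLastD [] = (l.reverse.takeWhile (fun c => c ≠ '}')).reverse := by
  induction l with
  | nil => simp [pieces]
  | cons c t ih =>
    by_cases hc : c = '}'
    · subst hc
      obtain ⟨hd, r, hp⟩ := List.exists_cons_of_ne_nil (pieces_ne_nil t)
      have hL : (pieces ('}' :: t)).getLastD [] = (pieces t).getLastD [] := by
        simp [pieces, hp, List.getLastD_cons]
      rw [hL, ih]
      have hR : List.takeWhile (fun c => c ≠ '}') (('}' :: t).reverse)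
              = List.takeWhile (fun c => c ≠ '}') t.reverse := by
        rw [List.reverse_cons, List.takeWhile_append]
        split
        · rename_i h'
          rw [(List.takeWhile_prefix _).eq_of_length h']
          simp
        · rfl
      rw [hR]
    · by_cases hm : '}' ∈ t
      · obtain ⟨hd, r, hp⟩ := List.exists_cons_of_ne_nil (pieces_ne_nil t)
        have hr : r ≠ [] := by
          have := pieces_tail_ne t hm
          simpa [hp] using this
        obtain ⟨h2, r2, rfl⟩ := List.exists_cons_of_ne_nil hr
        have hL : (pieces (c :: t)).getLastD [] = (pieces t).getLastD [] := by
          simp [pieces, hc, hp, List.getLastD_cons]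
        rw [hL, ih]
        have hR : List.takeWhile (fun c => c ≠ '}') ((c :: t).reverse)
                = List.takeWhile (fun c => c ≠ '}') t.reverse := by
          rw [List.reverse_cons, List.takeWhile_append]
          split
          · rename_i h'
            exfalso
            have heq := (List.takeWhile_prefix (l := t.reverse) (fun c => c ≠ '}')).eq_of_length h'
            have : ('}' : Char) ∈ List.takeWhile (fun c => c ≠ '}') t.reverse := by
              rw [heq]; simpa using hm
            have := List.mem_takeWhile_imp this
            simp at this
          · rfl
        rw [hR]
      · have hp := pieces_no_sep t hm
        have hL : (pieces (c :: t)).getLastD [] = c :: t := by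
          simp [pieces, hc, hp]
        rw [hL]
        have hall : List.takeWhile (fun c => c ≠ '}') t.reverse = t.reverse := by
          rw [List.takeWhile_eq_self_iff]
          intro a ha
          simp only [List.mem_reverse] at ha
          simp
          exact fun h' => hm (h' ▸ ha)
        rw [List.reverse_cons, List.takeWhile_append, if_pos (by rw [hall])]
        simp [List.takeWhile_cons, hc]

theorem A_eval (s : String) :
    filter_source s
      = if flagF s.toList then (false, "error_note")
        else (true, String.ofList (outF s.toList)) := by
  unfold filter_source
  rw [(foldA_spec s.toList []).1]
  simp

theorem B_eval (s : String) :
    filter_source_alt s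
      = if flagF s.toList then (false, "")
        else (true, String.ofList (outF s.toList)) := by
  have hz : filter_source_alt s
      = if PySem.Chars.isIn ['{'] ((PySem.List.pyGet? (PySem.Chars.splitOn s.toList ['}']) (-1)).getD []) then
          (false, "")
        else
          (true, String.ofList (PySem.Chars.join []
            ((PySem.Chars.splitOn s.toList ['}']).map
              (fun p => (PySem.Chars.splitOnMax p ['{'] 1).headD [])))) := rfl
  rw [hz, splitOn_eq_pieces, isIn_singleton,
      pyGet_neg_one _ (pieces_ne_nil _)]
  have h2 : (pieces s.toList).map (fun p => (PySem.Chars.splitOnMax p ['{'] 1).headD [])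
          = (pieces s.toList).map takeW :=
    List.map_congr_left (fun p _ => by rw [splitOnMax_head]; rfl)
  rw [h2, join_nil_flatten]
  rfl

theorem flagF_false_of_pre (s : String) (h : Pre_filter_source s) : flagF s.toList = false := by
  unfold Pre_filter_source at h
  unfold flagF
  rw [getLastD_pieces]
  simpa using h

-- ===== VERDICT (by name: the statement is the Claim_ definition above) =====
theorem filter_source_spec : Claim_equal_filter_source := by
  intro s _ hpre
  simp only [Spec_filter_source]
  rw [A_eval, B_eval, flagF_false_of_pre s hpre]
  simp
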